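-- pv_equiv track=rewrite | github.com/abhinavj08/Python-Menu-Driven-Projects | PROJECT 2/library_package/logic.py | calculate_fine
-- ===== SOURCE A (Python) =====
-- import math
--
-- def calculate_fine(days_overdue):
--     """Calculates fine based on escalating weekly tiers (10, 20, 60...)."""
--     if days_overdue <= 0:
--         return 0
--
--     total_fine = 0
--     remaining_days = days_overdue
--     week = 1
--
--     while remaining_days > 0:
--         days_in_current_week = min(remaining_days, 7)
--
--         # Rate pattern: W1=10, W2=10*2, W3=10*2*3 -> 10 * factorial(week)
--         rate_per_day = 10 * math.factorial(week)
--
--         total_fine += days_in_current_week * rate_per_day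
--         remaining_days -= days_in_current_week
--         week += 1
--
--     return total_fine
-- ===== SOURCE B (Python) =====
-- def calculate_fine(days_overdue):
--     """Calculates fine based on escalating weekly tiers (10, 20, 60...)."""
--     total = 0
--     rate = 10          # rate for the current week, maintained incrementally
--     week = 1
--     day = 0
--     while day < days_overdue:
--         day += 1
--         total += rate
--         if day % 7 == 0:       # a week just ended: escalate the daily rate
--             week += 1
--             rate *= week
--     return total
-- ===== Notes on version B (the rewrite author's own statement) =====
-- stated objective: alternative
-- what changed: Replaced the week-chunk loop (min over remaining days, math.factorial recomputed per week) with a day-by-day single pass that maintains the daily rate incrementally, multiplying it by the new week number at each 7-day boundary; no factorial calls, no min, no chunking.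
import Mathlib
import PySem

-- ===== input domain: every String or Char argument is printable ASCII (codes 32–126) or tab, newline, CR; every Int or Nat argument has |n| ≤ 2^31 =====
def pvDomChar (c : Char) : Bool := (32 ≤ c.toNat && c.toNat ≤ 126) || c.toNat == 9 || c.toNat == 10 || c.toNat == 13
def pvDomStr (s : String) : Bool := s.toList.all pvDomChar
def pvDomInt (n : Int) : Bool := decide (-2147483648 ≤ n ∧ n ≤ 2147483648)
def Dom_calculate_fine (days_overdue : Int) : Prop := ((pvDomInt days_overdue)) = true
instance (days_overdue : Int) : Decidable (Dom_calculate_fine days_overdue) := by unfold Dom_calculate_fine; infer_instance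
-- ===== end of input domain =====

-- B walks day by day, maintaining the daily rate incrementally (multiply by the new week
-- number at each 7-day boundary) instead of A's week-chunk loop with a factorial per week
-- (objective: alternative algorithm, no factorial/min/chunking; same order of cost).

-- math.factorial on a (nonnegative) Python int
def factInt (w : Int) : Int := (Nat.factorial w.toNat : Int)

-- ===== PORT A =====
-- the while-loop: state (remaining_days, week, total_fine)
def fineLoopA (remaining week total : Int) : Int :=
  if 0 < remaining then
    -- days_in_current_week = min(remaining_days, 7); rate_per_day = 10 * factorial(week)
    fineLoopA (remaining - min remaining 7) (week + 1)
      (total + min remaining 7 * (10 * factInt week))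
  else total
termination_by remaining.toNat
decreasing_by omega

def calculate_fine (days_overdue : Int) : Int :=
  if days_overdue ≤ 0 then 0
  else fineLoopA days_overdue 1 0

-- ===== PORT B =====
-- the while-loop: state (day, week, rate, total); n = days_overdue is fixed
def fineLoopB (n day week rate total : Int) : Int :=
  if day < n then
    if PySem.Int.mod (day + 1) 7 == 0 then
      fineLoopB n (day + 1) (week + 1) (rate * (week + 1)) (total + rate)
    else
      fineLoopB n (day + 1) week rate (total + rate)
  else total
termination_by (n - day).toNat
decreasing_by all_goals omega

def calculate_fine_alt (days_overdue : Int) : Int :=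
  fineLoopB days_overdue 0 1 10 0

-- ===== PRECONDITION & SPEC =====
def Spec_calculate_fine (days_overdue : Int) (out : Int) : Prop := out = calculate_fine_alt days_overdue
instance (days_overdue : Int) (out : Int) : Decidable (Spec_calculate_fine days_overdue out) := by unfold Spec_calculate_fine; infer_instance

-- ===== CLAIM =====
def Claim_equal_calculate_fine : Prop := ∀ (days_overdue : Int), Dom_calculate_fine days_overdue → Spec_calculate_fine days_overdue (calculate_fine days_overdue)

-- ===== LEMMAS AND PROOFS =====

-- sum of 70 * factorial(w+i) over the q full weeks starting at week w
def weeksSum : Nat → Int → Int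
  | 0, _ => 0
  | q + 1, w => 70 * factInt w + weeksSum q (w + 1)

theorem fineLoopA_spec (q : Nat) : ∀ (r w total : Int), 0 ≤ r → r < 7 →
    fineLoopA (7 * q + r) w total
      = total + weeksSum q w + (if 0 < r then r * 10 * factInt (w + q) else 0) := by
  induction q with
  | zero =>
    intro r w total h0 h7
    rw [show (7 : Int) * (0 : Nat) + r = r by push_cast; ring]
    by_cases hr : 0 < r
    · rw [fineLoopA]
      have hmin : min r 7 = r := by omega
      rw [if_pos hr, hmin]
      rw [fineLoopA]
      simp only [sub_self, lt_irrefl, if_pos hr, weeksSum, Nat.cast_zero]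
      rw [if_neg (fun h => h)]
      ring_nf
    · have hr0 : r = 0 := by omega
      subst hr0
      rw [fineLoopA]
      simp [weeksSum]
  | succ q ih =>
    intro r w total h0 h7
    have hpos : 0 < 7 * ((q : Int) + 1) + r := by
      have : (0 : Int) ≤ q := by positivity
      omega
    rw [fineLoopA]
    push_cast
    rw [if_pos (by omega)]
    have hmin : min (7 * ((q : Int) + 1) + r) 7 = 7 := by
      have : (0 : Int) ≤ q := by positivity
      omega
    have harg : 7 * ((q : Int) + 1) + r - min (7 * ((q : Int) + 1) + r) 7 = 7 * q + r := by
      rw [hmin]; ring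
    rw [harg, ih r (w + 1) _ h0 h7]
    simp only [weeksSum]
    have : w + 1 + (q : Int) = w + ((q : Int) + 1) := by ring
    rw [this, hmin]
    split <;> ring

-- one mid-week step of B
theorem stepB_mid (n d week rate total : Int) (hd : d < n)
    (hm : PySem.Int.mod (d + 1) 7 ≠ 0) :
    fineLoopB n d week rate total = fineLoopB n (d + 1) week rate (total + rate) := by
  rw [fineLoopB, if_pos hd, if_neg (by simpa using hm)]

-- a boundary step of B
theorem stepB_bound (n d week rate total : Int) (hd : d < n)
    (hm : PySem.Int.mod (d + 1) 7 = 0) :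
    fineLoopB n d week rate total
      = fineLoopB n (d + 1) (week + 1) (rate * (week + 1)) (total + rate) := by
  rw [fineLoopB, if_pos hd, if_pos (by simpa using hm)]

theorem mod7_eq (j k : Int) (h0 : 0 ≤ k) (h7 : k < 7) : PySem.Int.mod (7 * j + k) 7 = k := by
  rw [PySem.Int.mod_eq_emod_of_pos (by norm_num : (0:Int) < 7)]
  omega

-- B's loop over a partial final week: exactly k < 7 days remain, no boundary is crossed
theorem partB (k : Nat) : ∀ (j s week rate total : Int), 0 ≤ s → s + k < 7 →
    fineLoopB (7 * j + s + k) (7 * j + s) week rate total = total + k * rate := by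
  induction k with
  | zero =>
    intro j s week rate total _ _
    rw [fineLoopB]
    simp
  | succ k ih =>
    intro j s week rate total hs hk
    have hk' : ((k : Int) + 1) = ((k + 1 : Nat) : Int) := by push_cast; ring
    have hd : 7 * j + s < 7 * j + s + ((k : Nat) + 1 : Nat) := by push_cast; omega
    rw [stepB_mid _ _ _ _ _ hd]
    · have harg : 7 * j + s + ((k + 1 : Nat) : Int) = 7 * j + (s + 1) + k := by
        push_cast; ring
      have harg2 : 7 * j + s + 1 = 7 * j + (s + 1) := by ring
      rw [harg, harg2, ih j (s + 1) week rate (total + rate) (by omega) (by omega)]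
      push_cast; ring
    · have : 7 * j + s + 1 = 7 * j + (s + 1) := by ring
      rw [this, mod7_eq j (s + 1) (by omega) (by omega)]
      omega

-- B's loop over one full week: 7 mid steps then a boundary step
theorem weekB (n j week rate total : Int) (h : 7 * (j + 1) ≤ n) :
    fineLoopB n (7 * j) week rate total
      = fineLoopB n (7 * (j + 1)) (week + 1) (rate * (week + 1)) (total + 7 * rate) := by
  have s1 := stepB_mid n (7 * j) week rate total (by omega)
    (by rw [show 7 * j + 1 = 7 * j + 1 from rfl, mod7_eq j 1 (by omega) (by omega)]; omega)
  have s2 := stepB_mid n (7 * j + 1) week rate (total + rate) (by omega)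
    (by rw [show 7 * j + 1 + 1 = 7 * j + 2 by ring, mod7_eq j 2 (by omega) (by omega)]; omega)
  have s3 := stepB_mid n (7 * j + 2) week rate (total + rate + rate) (by omega)
    (by rw [show 7 * j + 2 + 1 = 7 * j + 3 by ring, mod7_eq j 3 (by omega) (by omega)]; omega)
  have s4 := stepB_mid n (7 * j + 3) week rate (total + rate + rate + rate) (by omega)
    (by rw [show 7 * j + 3 + 1 = 7 * j + 4 by ring, mod7_eq j 4 (by omega) (by omega)]; omega)
  have s5 := stepB_mid n (7 * j + 4) week rate (total + rate + rate + rate + rate) (by omega)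
    (by rw [show 7 * j + 4 + 1 = 7 * j + 5 by ring, mod7_eq j 5 (by omega) (by omega)]; omega)
  have s6 := stepB_mid n (7 * j + 5) week rate (total + rate + rate + rate + rate + rate) (by omega)
    (by rw [show 7 * j + 5 + 1 = 7 * j + 6 by ring, mod7_eq j 6 (by omega) (by omega)]; omega)
  have s7 := stepB_bound n (7 * j + 6) week rate (total + rate + rate + rate + rate + rate + rate) (by omega)
    (by rw [show 7 * j + 6 + 1 = 7 * (j + 1) + 0 by ring, mod7_eq (j + 1) 0 (by omega) (by omega)])
  rw [s1]
  rw [show 7 * j + 1 + 1 = 7 * j + 2 by ring] at s2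
  rw [show 7 * j + 2 + 1 = 7 * j + 3 by ring] at s3
  rw [show 7 * j + 3 + 1 = 7 * j + 4 by ring] at s4
  rw [show 7 * j + 4 + 1 = 7 * j + 5 by ring] at s5
  rw [show 7 * j + 5 + 1 = 7 * j + 6 by ring] at s6
  rw [show 7 * j + 6 + 1 = 7 * (j + 1) by ring] at s7
  rw [s2, s3, s4, s5, s6, s7]
  congr 1
  ring

-- factorial recurrence on Int (for nonnegative w)
theorem factInt_succ (w : Int) (hw : 0 ≤ w) : factInt (w + 1) = factInt w * (w + 1) := by
  unfold factInt
  have h1 : (w + 1).toNat = w.toNat + 1 := by omega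
  rw [h1, Nat.factorial_succ]
  push_cast
  have : ((w.toNat : Int)) = w := Int.toNat_of_nonneg hw
  rw [this]; ring

-- B's loop from the start of week j+1, with the invariant rate = 10 * (j+1)!
theorem fineLoopB_spec (q : Nat) : ∀ (j r total : Int), 0 ≤ j → 0 ≤ r → r < 7 →
    fineLoopB (7 * j + 7 * q + r) (7 * j) (j + 1) (10 * factInt (j + 1)) total
      = total + weeksSum q (j + 1)
        + (if 0 < r then r * 10 * factInt (j + 1 + q) else 0) := by
  induction q with
  | zero =>
    intro j r total hj h0 h7
    obtain ⟨k, hk⟩ : ∃ k : Nat, (k : Int) = r := ⟨r.toNat, Int.toNat_of_nonneg h0⟩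
    have hp := partB k j 0 (j + 1) (10 * factInt (j + 1)) total (by omega) (by omega)
    rw [show 7 * j + (0 : Int) + (k : Int) = 7 * j + (k : Int) by ring,
        show 7 * j + (0 : Int) = 7 * j by ring] at hp
    rw [show 7 * j + 7 * (((0 : Nat)) : Int) + r = 7 * j + (k : Int) by push_cast; omega]
    rw [hp]
    simp only [weeksSum, Nat.cast_zero]
    by_cases hr : 0 < r
    · rw [if_pos hr]; rw [hk]; ring_nf
    · have : (k : Int) = 0 := by omega
      rw [if_neg hr, this]; ring
  | succ q ih =>
    intro j r total hj h0 h7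
    have hn : 7 * (j + 1) ≤ 7 * j + 7 * ((q : Int) + 1) + r := by
      have : (0 : Int) ≤ q := by positivity
      omega
    have hcast : 7 * j + 7 * (((q + 1 : Nat)) : Int) + r = 7 * j + 7 * ((q : Int) + 1) + r := by
      push_cast; ring
    rw [hcast, weekB _ j _ _ _ hn]
    have harg : 7 * j + 7 * ((q : Int) + 1) + r = 7 * (j + 1) + 7 * q + r := by ring
    rw [harg]
    have hrate : 10 * factInt (j + 1) * (j + 1 + 1) = 10 * factInt (j + 1 + 1) := by
      rw [factInt_succ (j + 1) (by omega)]; ring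
    rw [hrate]
    rw [ih (j + 1) r _ (by omega) h0 h7]
    simp only [weeksSum]
    have h1 : j + 1 + 1 + (q : Int) = j + 1 + ((q : Int) + 1) := by ring
    have h2 : j + 1 + ((q : Int) + 1) = j + 1 + ((q + 1 : Nat) : Int) := by push_cast; ring
    rw [h1, h2]
    split <;> ring

-- ===== VERDICT =====
theorem calculate_fine_spec : Claim_equal_calculate_fine := by
  intro d _
  unfold Spec_calculate_fine calculate_fine calculate_fine_alt
  by_cases hle : d ≤ 0
  · rw [if_pos hle, fineLoopB, if_neg (by omega)]
  · rw [if_neg hle]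
    have hd : 0 < d := by omega
    have hdm : 7 * (d / 7) + d % 7 = d := by omega
    have h0r : 0 ≤ d % 7 := Int.emod_nonneg d (by norm_num)
    have h7r : d % 7 < 7 := Int.emod_lt_of_pos d (by norm_num)
    have hq0 : 0 ≤ d / 7 := Int.ediv_nonneg (by omega) (by norm_num)
    obtain ⟨q, hq⟩ : ∃ q : Nat, (q : Int) = d / 7 := ⟨(d / 7).toNat, Int.toNat_of_nonneg hq0⟩
    set r := d % 7 with hr
    have hdq : d = 7 * (q : Int) + r := by omega
    have hA : fineLoopA d 1 0
        = 0 + weeksSum q 1 + (if 0 < r then r * 10 * factInt (1 + q) else 0) := by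
      rw [hdq]; exact fineLoopA_spec q r 1 0 h0r h7r
    have hB0 := fineLoopB_spec q 0 r 0 (by omega) h0r h7r
    simp only [mul_zero, zero_add] at hB0
    rw [show factInt 1 = 1 by decide, mul_one] at hB0
    rw [hA]
    conv_rhs => rw [hdq]
    rw [hB0]
    ring
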